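-- pv_equiv track=rewrite | github.com/genomewalker/dart | scripts/create_damage_lookup.py | encode_hexamer
-- ===== SOURCE A (Python) =====
-- def encode_hexamer(seq):
--     """Encode hexamer to integer code."""
--     base_map = {'A': 0, 'C': 1, 'G': 2, 'T': 3}
--     code = 0
--     for c in seq.upper():
--         if c not in base_map:
--             return 4096  # Invalid
--         code = (code << 2) | base_map[c]
--     return code
-- ===== SOURCE B (Python) =====
-- def encode_hexamer(seq):
--     """Encode hexamer to integer code."""
--     vals = {'A': 0, 'C': 1, 'G': 2, 'T': 3}
--     s = seq.upper()
--     if any(c not in vals for c in s):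
--         return 4096  # Invalid
--     total = 0
--     weight = 1
--     for c in reversed(s):
--         total += vals[c] * weight
--         weight *= 4
--     return total
-- ===== Notes on version B (the rewrite author's own statement) =====
-- stated objective: alternative
-- what changed: B validates the whole string first, then accumulates the code back-to-front as a positional base-4 sum with an explicit weight accumulator, instead of A's single forward pass with early return and 2-bit shift/or Horner packing.
import Mathlib
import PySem

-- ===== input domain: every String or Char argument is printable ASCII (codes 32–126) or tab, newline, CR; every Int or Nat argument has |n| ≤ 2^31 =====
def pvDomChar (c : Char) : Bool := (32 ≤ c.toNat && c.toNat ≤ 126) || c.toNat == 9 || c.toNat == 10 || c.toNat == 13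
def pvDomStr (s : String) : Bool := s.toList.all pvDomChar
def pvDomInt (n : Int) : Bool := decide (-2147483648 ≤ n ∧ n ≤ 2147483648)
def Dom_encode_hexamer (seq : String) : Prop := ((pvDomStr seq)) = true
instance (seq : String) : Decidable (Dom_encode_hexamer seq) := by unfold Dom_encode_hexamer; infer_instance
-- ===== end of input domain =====

-- B replaces A's early-return forward Horner loop (2-bit shift/or packing) by a validate-first,
-- back-to-front positional base-4 sum with an explicit weight accumulator (alternative decomposition, same cost).


-- ===== PORT A =====
-- base_map = {'A': 0, 'C': 1, 'G': 2, 'T': 3}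
def pvBaseMap : PySem.Dict Char Int :=
  PySem.Dict.ofList [('A', 0), ('C', 1), ('G', 2), ('T', 3)]

-- the for-loop of A: early return 4096 on a missing key, else code = (code << 2) | base_map[c]
def pvLoopA : List Char → Int → Int
  | [], code => code
  | c :: rest, code =>
      match pvBaseMap.get? c with
      | none => 4096
      | some v => pvLoopA rest (PySem.Int.bor (code <<< (2 : Nat)) v)

def encode_hexamer (seq : String) : Int :=
  pvLoopA (PySem.Str.upper seq).toList 0

-- ===== PORT B =====
-- vals = {'A': 0, 'C': 1, 'G': 2, 'T': 3} read as a lookup function (None = absent)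
def pvVals? (c : Char) : Option Int :=
  if c = 'A' then some 0
  else if c = 'C' then some 1
  else if c = 'G' then some 2
  else if c = 'T' then some 3
  else none

-- the for-loop of B over reversed(s): state (total, weight)
def pvLoopB : List Char → Int × Int → Int × Int
  | [], tw => tw
  | c :: rest, tw => pvLoopB rest (tw.1 + ((pvVals? c).getD 0) * tw.2, tw.2 * 4)

def encode_hexamer_alt (seq : String) : Int :=
  let s := (PySem.Str.upper seq).toList
  if s.any (fun c => (pvVals? c).isNone) then 4096
  else (pvLoopB s.reverse (0, 1)).1

-- ===== PRECONDITION & SPEC =====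
def Spec_encode_hexamer (seq : String) (out : Int) : Prop := out = encode_hexamer_alt seq
instance (seq : String) (out : Int) : Decidable (Spec_encode_hexamer seq out) := by unfold Spec_encode_hexamer; infer_instance

-- ===== CLAIM (what is proved, stated in full; the proofs are below) =====
def Claim_equal_encode_hexamer : Prop := ∀ (seq : String), Dom_encode_hexamer seq → Spec_encode_hexamer seq (encode_hexamer seq)

-- ===== LEMMAS AND PROOFS =====

-- the dict of A and the lookup function of B agree pointwise
theorem pvBaseMap_get? (c : Char) : pvBaseMap.get? c = pvVals? c := by
  have hmk : pvBaseMap = PySem.Dict.mk [('A', 0), ('C', 1), ('G', 2), ('T', 3)] := by decide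
  rw [hmk]
  simp only [PySem.Dict.get?_mk_cons, pvVals?]
  by_cases hA : c = 'A'
  · subst hA; decide
  by_cases hC : c = 'C'
  · subst hC; decide
  by_cases hG : c = 'G'
  · subst hG; decide
  by_cases hT : c = 'T'
  · subst hT; decide
  simp [PySem.Dict.get?, hA, hC, hG, hT, Ne.symm hA, Ne.symm hC, Ne.symm hG, Ne.symm hT]

-- little-endian base-4 value of a (valid) list
def pvH : List Char → Int
  | [] => 0
  | c :: rest => (pvVals? c).getD 0 + 4 * pvH rest

theorem pvH_append (xs ys : List Char) :
    pvH (xs ++ ys) = pvH xs + 4 ^ xs.length * pvH ys := by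
  induction xs with
  | nil => simp [pvH]
  | cons c r ih =>
    simp only [List.cons_append, pvH, ih, List.length_cons, pow_succ]
    ring

theorem pvLoopB_fst (l : List Char) (t w : Int) :
    (pvLoopB l (t, w)).1 = t + w * pvH l := by
  induction l generalizing t w with
  | nil => simp [pvLoopB, pvH]
  | cons c r ih => simp [pvLoopB, pvH, ih]; ring

theorem pvBor_step (code v : Int) (hc : 0 ≤ code) (hv0 : 0 ≤ v) (hv : v < 4) :
    PySem.Int.bor (code <<< (2 : Nat)) v = 4 * code + v := by
  have hsh : code <<< (2 : Nat) = code * 4 := by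
    rw [Int.shiftLeft_eq]; norm_num
  have h1 : ∀ m : Nat, (2 * m) ||| 1 = 2 * m + 1 := by
    intro m
    simpa [Nat.bit] using Nat.lor_bit false m true 0
  have key : ∀ (n k : Nat), k < 4 → (4 * n) ||| k = 4 * n + k := by
    intro n k hk
    interval_cases k
    · simp
    · rw [show 4 * n = 2 * (2 * n) by ring, h1 (2 * n)]
      try ring
    · rw [show 4 * n = 2 * (2 * n) by ring, show (2 : Nat) = 2 * 1 by norm_num]
      have := Nat.lor_bit false (2 * n) false 1
      simp only [Nat.bit, Bool.or_self, cond_false] at this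
      rw [this, h1 n]
      try ring
    · rw [show 4 * n = 2 * (2 * n) by ring, show (3 : Nat) = 2 * 1 + 1 by norm_num]
      have := Nat.lor_bit false (2 * n) true 1
      simp only [Nat.bit, Bool.false_or, cond_false, cond_true] at this
      rw [this, h1 n]
      try ring
  rw [hsh, PySem.Int.bor_of_nonneg (by positivity) hv0]
  have h4 : (code * 4).toNat = 4 * code.toNat := by omega
  have hvv : v.toNat < 4 := by omega
  rw [h4, key _ _ hvv]
  omega

-- A's loop, characterised: 4096 if any invalid char, else the forward Horner value
theorem pvLoopA_eq (l : List Char) (code : Int) (hc : 0 ≤ code) :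
    pvLoopA l code =
      if l.any (fun c => (pvVals? c).isNone) then 4096
      else code * 4 ^ l.length + pvH l.reverse := by
  induction l generalizing code with
  | nil => simp [pvLoopA, pvH]
  | cons c r ih =>
    rw [pvLoopA, pvBaseMap_get?]
    cases hv : pvVals? c with
    | none => simp [List.any_cons, hv]
    | some v =>
      show pvLoopA r (PySem.Int.bor (code <<< (2 : Nat)) v) = _
      have hv03 : 0 ≤ v ∧ v < 4 := by
        simp only [pvVals?] at hv
        split_ifs at hv
        all_goals simp only [Option.some.injEq] at hv
        all_goals omega
      rw [pvBor_step code v hc hv03.1 hv03.2]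
      have hnn : 0 ≤ 4 * code + v := by omega
      rw [ih _ hnn]
      by_cases hany : r.any (fun c => (pvVals? c).isNone)
      · simp [List.any_cons, hany, hv]
      · simp only [List.any_cons, hany, hv, Option.isNone_some, Bool.or_false,
          List.reverse_cons, List.length_cons]
        rw [pvH_append]
        simp [pvH, hv, pow_succ]
        ring

-- ===== VERDICT (by name: the statement is the Claim_ definition above) =====
theorem encode_hexamer_spec : Claim_equal_encode_hexamer := by
  intro seq _
  unfold Spec_encode_hexamer encode_hexamer encode_hexamer_alt
  show pvLoopA (PySem.Str.upper seq).toList 0 =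
    if ((PySem.Str.upper seq).toList.any fun c => (pvVals? c).isNone) = true then 4096
    else (pvLoopB (PySem.Str.upper seq).toList.reverse (0, 1)).1
  rw [pvLoopA_eq _ 0 le_rfl]
  split_ifs with h
  · rfl
  · rw [pvLoopB_fst]
    ring
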